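-- pv_equiv track=rewrite | github.com/YuriyNovikov13/seminar_7 | Tp.py | check_num1
-- ===== SOURCE A (Python) =====
-- def check_num1(a: str):
--     '''
--     проверка первого числа
--     '''
--     cnt = 0
--     res = True
--     for i in range(len(a)):
--         if i == 0 and (a[i] == '-' or a[i].isdigit()):
--             res = True
--         elif not a[i].isdigit() and a[i] != '.':
--             res = False
--         elif a[i] in '.':
--             cnt += 1
--         if cnt > 1:
--             res = False
--
--     '''
--     определение кол-ва знаков после запятой
--     '''
--     b = a.find('.')
--     if b == -1:
--         round1 = 0
--     else:
--         round1 = len(a) - (a.find('.') + 1)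
--     return res, round1
-- ===== SOURCE B (Python) =====
-- def check_num1(a: str):
--     parts = a.split('.')
--     head = parts[0][1:] if parts[0][:1] == '-' else parts[0]
--     res = len(parts) <= 2 and all(p == '' or p.isdigit() for p in [head] + parts[1:])
--     round1 = len(a) - len(parts[0]) - 1 if len(parts) > 1 else 0
--     return res, round1
-- ===== Notes on version B (the rewrite author's own statement) =====
-- stated objective: alternative
-- what changed: Replaced A's stateful per-character index loop carrying (cnt, res) with a split-on-dot decomposition: the string is cut once into dot-separated pieces, validity is 'at most two pieces, each piece (after stripping a leading minus from the first piece) empty or all digits', and the decimal count is len(a) minus len(parts[0]) minus 1.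
import Mathlib
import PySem

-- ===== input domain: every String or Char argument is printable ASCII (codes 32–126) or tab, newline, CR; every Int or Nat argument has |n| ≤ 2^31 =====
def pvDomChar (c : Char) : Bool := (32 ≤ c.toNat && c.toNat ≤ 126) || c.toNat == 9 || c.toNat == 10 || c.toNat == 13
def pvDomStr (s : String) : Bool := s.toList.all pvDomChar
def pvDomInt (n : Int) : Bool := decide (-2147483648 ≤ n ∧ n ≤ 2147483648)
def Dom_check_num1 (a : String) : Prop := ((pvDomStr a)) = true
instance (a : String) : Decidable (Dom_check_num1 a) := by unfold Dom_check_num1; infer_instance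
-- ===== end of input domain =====

-- B replaces A's stateful index loop carrying (cnt, res) by splitting the string once on the dot separator and
-- validating the resulting pieces (the first piece loses a leading minus); decimals = len(a) - len(parts[0]) - 1 (objective: alternative).

-- ===== PORT A =====
-- one iteration of A's loop body: the state is (cnt, res), the visited pair is (i, a[i])
def check_num1_step (st : Int × Bool) (ic : Int × Char) : Int × Bool :=
  let cnt := st.1
  let res := st.2
  let i := ic.1
  let c := ic.2
  let (cnt1, res1) :=
    if i == 0 && (c == '-' || PySem.Chars.isdigit c) then (cnt, true)
    else if !(PySem.Chars.isdigit c) && !(c == '.') then (cnt, false)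
    else if PySem.Chars.isIn [c] ['.'] then (cnt + 1, res)
    else (cnt, res)
  if cnt1 > 1 then (cnt1, false) else (cnt1, res1)

def check_num1 (a : String) : Bool × Int :=
  let st := (PySem.List.pyRange 0 (PySem.Str.len a) 1).foldl
    (fun st i => check_num1_step st (i, PySem.List.pyGetD a.toList i ' ')) (0, true)
  let b := PySem.Str.find a "."
  let round1 : Int := if b == -1 then 0 else PySem.Str.len a - (PySem.Str.find a "." + 1)
  (st.2, round1)

-- ===== PORT B =====
def check_num1_alt (a : String) : Bool × Int :=
  let parts := PySem.Chars.splitOn a.toList ['.']        -- a.split('.')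
  let p0 := PySem.List.pyGetD parts 0 []                  -- parts[0] (split never returns [])
  let head := if PySem.List.slice p0 none (some 1) == ['-'] then PySem.List.slice p0 (some 1) none else p0
  let res := decide (parts.length ≤ 2) &&
    (head :: PySem.List.slice parts (some 1) none).all
      (fun p => p == ([] : List Char) || PySem.Chars.strIsdigit p)
  let round1 : Int := if parts.length > 1 then PySem.Str.len a - p0.length - 1 else 0
  (res, round1)

-- ===== PRECONDITION & SPEC =====
def Spec_check_num1 (a : String) (out : Bool × Int) : Prop := out = check_num1_alt a
instance (a : String) (out : Bool × Int) : Decidable (Spec_check_num1 a out) := by unfold Spec_check_num1; infer_instance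

-- ===== CLAIM =====
def Claim_equal_check_num1 : Prop := ∀ (a : String), Dom_check_num1 a → Spec_check_num1 a (check_num1 a)

-- ===== LEMMAS AND PROOFS =====

-- proof-side model of splitting on '.': (first piece, remaining pieces)
def mySplit : List Char → List Char × List (List Char)
  | [] => ([], [])
  | c :: t => if c = '.' then ([], (mySplit t).1 :: (mySplit t).2) else (c :: (mySplit t).1, (mySplit t).2)

def charOK (c : Char) : Bool := PySem.Chars.isdigit c || c == '.'

-- A's res in closed form
def resFormula (l : List Char) : Bool :=
  decide (l.count '.' ≤ 1) && (if l.take 1 = ['-'] then l.drop 1 else l).all charOK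

-- membership of a one-character string in "." is equality with '.'
theorem isIn_dot (c : Char) : PySem.Chars.isIn [c] ['.'] = (c == '.') := by
  by_cases h : c = '.' <;> simp [h, PySem.Chars.isIn, PySem.Chars.find, PySem.Chars.find.go, List.isPrefixOf]

-- splitOn's fuelled loop computes mySplit
theorem splitOn_go_eq (fuel : Nat) : ∀ (l : List Char) (cur : List Char) (acc : List (List Char)),
    l.length < fuel →
    PySem.Chars.splitOn.go ['.'] fuel l cur acc
      = acc.reverse ++ (cur.reverse ++ (mySplit l).1) :: (mySplit l).2 := by
  induction fuel with
  | zero => intro l cur acc h; omega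
  | succ n ih =>
    intro l cur acc h
    cases l with
    | nil => simp [PySem.Chars.splitOn.go, mySplit]
    | cons c t =>
      have ht : t.length < n := by simpa using h
      by_cases hc : c = '.'
      · simp [PySem.Chars.splitOn.go, List.isPrefixOf, hc, mySplit, ih t [] (cur.reverse :: acc) ht]
      · simp [PySem.Chars.splitOn.go, List.isPrefixOf, Ne.symm hc, hc, mySplit, ih t (c :: cur) acc ht]

theorem splitOn_eq (l : List Char) :
    PySem.Chars.splitOn l ['.'] = (mySplit l).1 :: (mySplit l).2 := by
  simp [PySem.Chars.splitOn, splitOn_go_eq (l.length + 1) l [] [] (by omega)]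

-- the number of later pieces is the number of dots
theorem count_cons_ne (c : Char) (t : List Char) (hc : c ≠ '.') : (c :: t).count '.' = t.count '.' := by
  simp [hc]

theorem mySplit_snd_length (l : List Char) : (mySplit l).2.length = l.count '.' := by
  induction l with
  | nil => simp [mySplit]
  | cons c t ih =>
    by_cases hc : c = '.'
    · simp [mySplit, hc, ih]
    · simp [mySplit, hc, ih, count_cons_ne c t hc]

-- the first piece is the maximal dot-free prefix
theorem mySplit_fst (l : List Char) : (mySplit l).1 = l.takeWhile (fun c => !(c == '.')) := by
  induction l with
  | nil => simp [mySplit]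
  | cons c t ih => by_cases hc : c = '.' <;> simp [mySplit, hc, ih]

-- "piece empty or piece.isdigit()" is "every char a digit"
theorem pieceOK_eq (p : List Char) :
    (p == ([] : List Char) || PySem.Chars.strIsdigit p) = p.all PySem.Chars.isdigit := by
  cases p <;> simp [PySem.Chars.strIsdigit]

-- under a dot budget, piecewise digit checking is the uniform char check
theorem core (l : List Char) : ∀ (k : Nat),
    (decide (l.count '.' ≤ k) && ((mySplit l).1 :: (mySplit l).2).all (fun p => p.all PySem.Chars.isdigit))
      = (decide (l.count '.' ≤ k) && l.all charOK) := by
  induction l with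
  | nil => intro k; simp [mySplit]
  | cons c t ih =>
    intro k
    by_cases hc : c = '.'
    · have hcnt : (c :: t).count '.' = t.count '.' + 1 := by simp [hc]
      cases k with
      | zero =>
        have hn : ¬ ((c :: t).count '.' ≤ 0) := by omega
        simp [hn]
      | succ m =>
        have h1 : ((c :: t).count '.' ≤ m + 1) ↔ (t.count '.' ≤ m) := by omega
        have := ih m
        simp only [mySplit, hc, if_pos, List.all_cons, charOK]
        simp only [List.all_cons] at this ⊢
        simp only [List.all_nil, Bool.true_and, show (('.' : Char) == '.') = true from rfl, Bool.or_true]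
        rcases Bool.eq_false_or_eq_true (decide (t.count '.' ≤ m)) with hd | hd <;> simp [hd] at this ⊢
        exact this
    · have h1 : (c :: t).count '.' = t.count '.' := count_cons_ne c t hc
      have hch : charOK c = PySem.Chars.isdigit c := by simp [charOK, hc]
      have := ih k
      simp only [mySplit, if_neg hc, List.all_cons, h1, hch]
      rcases Bool.eq_false_or_eq_true (decide (t.count '.' ≤ k)) with hd | hd <;> simp [hd] at this ⊢
      rcases Bool.eq_false_or_eq_true (PySem.Chars.isdigit c) with hd2 | hd2 <;> simp [hd2]
      exact this

theorem prefix_singleton_iff (c : Char) (xs : List Char) : [c] <+: xs ↔ xs.head? = some c := by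
  cases xs with
  | nil => simp
  | cons x t =>
    constructor
    · rintro ⟨r, hr⟩
      simp at hr
      simp [hr.1]
    · intro h
      simp at h
      exact ⟨t, by simp [h]⟩

-- a.find('.') is the length of the dot-free prefix (or -1)
theorem find_dot (l : List Char) :
    PySem.Chars.find l ['.'] =
      if '.' ∈ l then ((l.takeWhile (fun c => !(c == '.'))).length : Int) else -1 := by
  by_cases hm : '.' ∈ l
  · obtain ⟨s, t, hst⟩ := List.append_of_mem hm
    have hinf : ['.'] <:+: l := ⟨s, t, by simp [hst]⟩
    have hne : PySem.Chars.find l ['.'] ≠ -1 := by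
      rw [Ne, PySem.Chars.find_eq_neg_one_iff]; exact fun h => h hinf
    have hnn : 0 ≤ PySem.Chars.find l ['.'] := (PySem.Chars.find_nonneg_iff l ['.']).mpr hinf
    have hspec := PySem.Chars.findFrom_natCast_spec l ['.'] 0 (Nat.zero_le _)
      (by rw [show ((0:Nat):Int) = 0 from rfl, PySem.Chars.findFrom_zero]; exact hne)
    rw [show ((0:Nat):Int) = 0 from rfl, PySem.Chars.findFrom_zero] at hspec
    obtain ⟨-, hpre, hmin⟩ := hspec
    set j := (PySem.Chars.find l ['.']).toNat with hj
    set tw := l.takeWhile (fun c => !(c == '.')) with htw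
    -- l = tw ++ '.' :: rest
    have hdw : l.dropWhile (fun c => !(c == '.')) ≠ [] := by
      intro h0
      have hta := List.takeWhile_append_dropWhile (p := fun c => !(c == '.')) (l := l)
      rw [h0, List.append_nil] at hta
      have hmem : '.' ∈ l.takeWhile (fun c => !(c == '.')) := by rw [hta]; exact hm
      exact absurd (List.mem_takeWhile_imp hmem) (by simp)
    have hhead : ((l.dropWhile (fun c => !(c == '.'))).head hdw) = '.' := by
      have := List.head_dropWhile_not (fun c => !(c == '.')) hdw
      simpa using this
    have hsplit : l = tw ++ '.' :: (l.dropWhile (fun c => !(c == '.'))).tail := by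
      conv_lhs => rw [← List.takeWhile_append_dropWhile (p := fun c => !(c == '.')) (l := l)]
      rw [← htw]
      congr 1
      cases hdw0 : l.dropWhile (fun c => !(c == '.')) with
      | nil => exact absurd hdw0 hdw
      | cons x xs =>
        have : x = '.' := by
          have := List.head_dropWhile_not (fun c => !(c == '.')) hdw
          simp [hdw0] at this; exact this
        simp [this]
    have hpre_tw : ['.'] <+: l.drop tw.length := by
      rw [hsplit, List.drop_left]
      exact ⟨_, rfl⟩
    -- j ≤ tw.length by minimality at tw.length
    have h1 : j ≤ tw.length := by
      by_contra hlt
      exact hmin tw.length (Nat.zero_le _) (by omega) hpre_tw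
    -- tw.length ≤ j: chars before j are in tw hence not '.'
    have h2 : ¬ j < tw.length := by
      intro hlt
      have hget : l[j]? = some '.' := by
        rw [← List.head?_drop]; exact (prefix_singleton_iff '.' _).mp hpre
      have hj_tw : l[j]? = tw[j]? := by
        rw [hsplit]
        exact (List.getElem?_append_left hlt)
      rw [hj_tw] at hget
      have hmem : '.' ∈ tw := List.mem_of_getElem? hget
      exact absurd (List.mem_takeWhile_imp hmem) (by simp)
    have hjeq : j = tw.length := by omega
    rw [if_pos hm, ← hjeq, hj]
    omega
  · rw [if_neg hm, PySem.Chars.find_eq_neg_one_iff]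
    intro h
    exact hm (h.subset (by simp))

-- A's loop over the positions after index 0 (closed form of the final (cnt, res))
theorem tail_fold (l : List Char) : ∀ (s cnt : Int) (res : Bool), 1 ≤ s → (1 < cnt → res = false) →
    (PySem.List.enumerate l s).foldl check_num1_step (cnt, res) =
      (cnt + l.count '.',
        res && l.all (fun c => PySem.Chars.isdigit c || c == '.')
            && (decide (l = []) || decide (cnt + (l.count '.' : Int) ≤ 1))) := by
  induction l with
  | nil => intro s cnt res _ _; simp [PySem.List.enumerate_nil]
  | cons c t ih =>
    intro s cnt res hs hinv
    rw [PySem.List.enumerate_cons, List.foldl_cons]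
    have hs0 : (s == (0:Int)) = false := beq_eq_false_iff_ne.mpr (by omega)
    by_cases hd : c = '.'
    · by_cases h0 : 0 < cnt
      · have hstep : check_num1_step (cnt, res) (s, c) = (cnt + 1, false) := by
          simp [check_num1_step, hs0, isIn_dot, hd, h0]
        rw [hstep, ih (s+1) (cnt+1) false (by omega) (fun _ => rfl)]
        have hn : ¬ (cnt + ((t.count '.' : Int) + 1) ≤ 1) := by omega
        refine Prod.ext ?_ ?_
        · simp [hd]; ring
        · simp [hd, hn]
      · have hstep : check_num1_step (cnt, res) (s, c) = (cnt + 1, res) := by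
          simp [check_num1_step, hs0, isIn_dot, hd, h0]
        rw [hstep, ih (s+1) (cnt+1) res (by omega) (fun h => absurd (by omega) h0)]
        refine Prod.ext ?_ ?_
        · simp [hd]; ring
        · by_cases ht : t = []
          · simp [ht, hd]; intro _; omega
          · have he : cnt + 1 + ((t.count '.' : Int)) = cnt + ((t.count '.' : Int) + 1) := by ring
            simp [ht, hd, he]
    · by_cases hg : PySem.Chars.isdigit c = true
      · have hstep : check_num1_step (cnt, res) (s, c) = (cnt, if 1 < cnt then false else res) := by
          simp [check_num1_step, hs0, isIn_dot, hd, hg]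
          split_ifs with h1 <;> simp [h1]
        have hif : (if 1 < cnt then false else res) = res := by
          split_ifs with h1
          · exact (hinv h1).symm
          · rfl
        rw [hstep, hif, ih (s+1) cnt res (by omega) hinv]
        refine Prod.ext ?_ ?_
        · simp [hd]
        · by_cases ht : t = []
          · simp [ht, hd, hg]
            intro hr
            by_contra hcnt
            exact absurd (hinv (by omega)) (by simp [hr])
          · simp [ht, hd, hg]
      · have hstep : check_num1_step (cnt, res) (s, c) = (cnt, false) := by
          simp [check_num1_step, hs0, hd, hg]
        rw [hstep, ih (s+1) cnt false (by omega) (fun _ => rfl)]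
        refine Prod.ext ?_ ?_
        · simp [hd]
        · simp [hd, hg]

-- A's res equals the closed form
theorem A_res (a : String) :
    ((PySem.List.pyRange 0 (PySem.Str.len a) 1).foldl
      (fun st i => check_num1_step st (i, PySem.List.pyGetD a.toList i ' ')) ((0:Int), true)).2
    = resFormula a.toList := by
  rw [show (PySem.List.pyRange 0 (PySem.Str.len a) 1).foldl
      (fun st i => check_num1_step st (i, PySem.List.pyGetD a.toList i ' ')) ((0:Int), true)
      = (PySem.List.enumerate a.toList 0).foldl check_num1_step ((0:Int), true) by
    rw [PySem.List.enumerate_eq_map_pyRange a.toList ' ', List.foldl_map]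
    rfl]
  unfold resFormula charOK
  cases h : a.toList with
  | nil => simp [PySem.List.enumerate_nil]
  | cons c rest =>
    rw [PySem.List.enumerate_cons]
    rw [List.foldl_cons, show ((0:Int)+1) = 1 from by decide]
    by_cases hm : c = '-'
    · have hstep : check_num1_step ((0:Int), true) ((0:Int), c) = (0, true) := by
        rw [hm]; decide
      rw [hstep, tail_fold rest 1 0 true (le_refl 1) (by omega)]
      by_cases hr : rest = []
      · simp [hr, hm]
      · simp [hr, hm, Bool.and_comm]
    · by_cases hg : PySem.Chars.isdigit c = true
      · have hdot : c ≠ '.' := by intro hh; rw [hh] at hg; exact absurd hg (by decide)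
        have hstep : check_num1_step ((0:Int), true) ((0:Int), c) = (0, true) := by
          simp [check_num1_step, hg]
        rw [hstep, tail_fold rest 1 0 true (le_refl 1) (by omega)]
        by_cases hr : rest = []
        · simp [hr, hg, hdot, hm]
        · simp [hr, hg, hdot, hm, Bool.and_comm]
      · by_cases hdot : c = '.'
        · have hstep : check_num1_step ((0:Int), true) ((0:Int), c) = (1, true) := by
            rw [hdot]; decide
          rw [hstep, tail_fold rest 1 1 true (le_refl 1) (by omega)]
          by_cases hr : rest = []
          · simp [hr, hdot]
          · simp [hr, hdot, Bool.and_comm]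
        · have hstep : check_num1_step ((0:Int), true) ((0:Int), c) = (0, false) := by
            simp [check_num1_step, hm, hg, hdot]
          rw [hstep, tail_fold rest 1 0 false (le_refl 1) (by omega)]
          simp [hg, hdot, hm]

-- parts[0] of a cons list
theorem pyGetD_cons_zero (x : List Char) (xs : List (List Char)) (d : List Char) :
    PySem.List.pyGetD (x :: xs) 0 d = x := by
  simp [PySem.List.pyGetD, PySem.List.pyGet?, PySem.List.pyIdx?]

theorem decide_succ_le_two (n : Nat) : decide (n + 1 ≤ 2) = decide (n ≤ 1) := by
  by_cases h : n ≤ 1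
  · simp [h]
  · simp [h]

-- B's res equals the closed form
theorem B_res (a : String) :
    (decide ((PySem.Chars.splitOn a.toList ['.']).length ≤ 2) &&
      ((if PySem.List.slice (PySem.List.pyGetD (PySem.Chars.splitOn a.toList ['.']) 0 []) none (some 1) == ['-']
          then PySem.List.slice (PySem.List.pyGetD (PySem.Chars.splitOn a.toList ['.']) 0 []) (some 1) none
          else PySem.List.pyGetD (PySem.Chars.splitOn a.toList ['.']) 0 [])
        :: PySem.List.slice (PySem.Chars.splitOn a.toList ['.']) (some 1) none).all
        (fun p => p == ([] : List Char) || PySem.Chars.strIsdigit p))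
    = resFormula a.toList := by
  rw [splitOn_eq]
  rw [PySem.List.slice_from _ (by norm_num : (0:Int) ≤ 1)]
  rw [PySem.List.slice_from _ (by norm_num : (0:Int) ≤ 1)]
  rw [PySem.List.slice_to _ (by norm_num : (0:Int) ≤ 1)]
  rw [pyGetD_cons_zero]
  simp only [Int.toNat_one, List.drop_succ_cons, List.drop_zero, List.length_cons, pieceOK_eq]
  simp only [mySplit_snd_length, decide_succ_le_two]
  unfold resFormula
  cases hl : a.toList with
  | nil => simp [mySplit]
  | cons c rest =>
    by_cases hm : c = '-'
    · have hsp : mySplit (c :: rest) = ('-' :: (mySplit rest).1, (mySplit rest).2) := by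
        rw [hm]; simp [mySplit]
      have hcnt : (c :: rest).count '.' = rest.count '.' := count_cons_ne c rest (by rw [hm]; decide)
      rw [hsp, hcnt]
      simp only [List.take_succ_cons, List.take_zero, List.drop_succ_cons, List.drop_zero, hm]
      simp only [if_pos, show ((['-'] : List Char) == ['-']) = true from rfl]
      simpa using core rest 1
    · have hfalse : (List.take 1 (mySplit (c :: rest)).1 == ['-']) = false := by
        rw [mySplit_fst]
        by_cases hc : c = '.'
        · simp [hc]
        · simp [hc, hm]
      have hrhs : ¬ (List.take 1 (c :: rest) = ['-']) := by simp [hm]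
      simp only [hfalse, Bool.false_eq_true, if_false, if_neg hrhs]
      simpa using core (c :: rest) 1

theorem check_num1_eq_alt (a : String) : check_num1 a = check_num1_alt a := by
  refine Prod.ext ((A_res a).trans (B_res a).symm) ?_
  show (if PySem.Str.find a "." == -1 then (0:Int) else PySem.Str.len a - (PySem.Str.find a "." + 1))
      = (if (PySem.Chars.splitOn a.toList ['.']).length > 1
          then PySem.Str.len a - (PySem.List.pyGetD (PySem.Chars.splitOn a.toList ['.']) 0 []).length - 1 else 0)
  rw [splitOn_eq, pyGetD_cons_zero, mySplit_fst]
  have hfind : PySem.Str.find a "." = PySem.Chars.find a.toList ['.'] := by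
    rw [PySem.Str.find_eq, show ("." : String).toList = ['.'] from by decide]
  rw [hfind, find_dot]
  simp only [List.length_cons, mySplit_snd_length]
  by_cases hm : '.' ∈ a.toList
  · have hc : 0 < a.toList.count '.' := List.count_pos_iff.mpr hm
    have hlen : PySem.Str.len a = (a.toList.length : Int) := by
      simp [PySem.Str.len_eq]
    simp only [hm, if_true, hlen]
    rw [if_neg (by simp), if_pos (by omega)]
    omega
  · have hc : a.toList.count '.' = 0 := by rw [List.count_eq_zero]; exact hm
    simp only [hm, if_false, hc]
    norm_num

-- ===== VERDICT =====
theorem check_num1_spec : Claim_equal_check_num1 := by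
  intro a _
  unfold Spec_check_num1
  exact check_num1_eq_alt a
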